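-- pv_equiv track=rewrite | github.com/anonymous2025abc/Arithmetic_Transformer | result_analysis_script/mul_digitwise_error_colormap.py | _select_pred_columns
-- ===== SOURCE A (Python) =====
-- from typing import Dict, Tuple, List, Union, Optional
--
-- def _select_pred_columns(available_steps: List[int], interval: int, offset: int, max_steps: int) -> List[int]:
--     """
--     Given a sorted list of available pred steps, choose a subset that approximates every 'interval' steps
--     between offset and max_steps by choosing the available column nearest to each target multiple.
--     Returns a sorted list of chosen available steps (unique).
--     """
--     if interval <= 0:
--         # if interval not positive, return all steps in range
--         return [s for s in available_steps if offset <= s <= max_steps]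
--
--     targets = list(range(offset, max_steps + 1, interval))
--     chosen = []
--     avail = [s for s in available_steps if offset <= s <= max_steps]
--     if not avail:
--         return []
--     used = set()
--     for t in targets:
--         best = min(avail, key=lambda s: (abs(s - t), s))
--         if best not in used:
--             chosen.append(best)
--             used.add(best)
--     chosen_sorted = sorted(chosen)
--     return chosen_sorted
-- ===== SOURCE B (Python) =====
-- from typing import List
-- import bisect
--
-- def _nearest(avail: List[int], t: int) -> int:
--     """Nearest value to t in sorted distinct avail, ties to the smaller value."""
--     i = bisect.bisect_left(avail, t)
--     if i == 0:
--         return avail[0]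
--     if i == len(avail):
--         return avail[-1]
--     lo, hi = avail[i - 1], avail[i]
--     return lo if t - lo <= hi - t else hi
--
-- def _select_pred_columns(available_steps: List[int], interval: int, offset: int, max_steps: int) -> List[int]:
--     in_range = [s for s in available_steps if offset <= s <= max_steps]
--     if interval <= 0:
--         return in_range
--     avail = sorted(set(in_range))
--     if not avail:
--         return []
--     chosen = set()
--     for t in range(offset, max_steps + 1, interval):
--         chosen.add(_nearest(avail, t))
--     return sorted(chosen)
-- ===== Notes on version B (the rewrite author's own statement) =====
-- stated objective: alternative
-- what changed: Replaces the per-target linear min-scan over the candidate list with a binary search (bisect) for the nearest value in the sorted deduplicated candidates, collecting chosen values in a set instead of list+membership-set.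
import Mathlib
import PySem

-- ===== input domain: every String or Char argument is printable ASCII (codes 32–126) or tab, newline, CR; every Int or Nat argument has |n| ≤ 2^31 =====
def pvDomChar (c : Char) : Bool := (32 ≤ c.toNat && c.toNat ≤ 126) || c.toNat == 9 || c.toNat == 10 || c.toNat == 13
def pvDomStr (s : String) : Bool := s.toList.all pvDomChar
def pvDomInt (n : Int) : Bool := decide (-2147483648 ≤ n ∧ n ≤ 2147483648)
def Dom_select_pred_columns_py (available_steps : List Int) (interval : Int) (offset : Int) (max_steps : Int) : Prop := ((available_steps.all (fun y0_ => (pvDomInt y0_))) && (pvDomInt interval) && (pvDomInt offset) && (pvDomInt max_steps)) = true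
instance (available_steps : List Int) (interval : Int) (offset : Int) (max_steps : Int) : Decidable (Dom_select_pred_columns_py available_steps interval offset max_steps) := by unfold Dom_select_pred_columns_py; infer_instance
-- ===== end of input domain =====

-- B replaces A's per-target linear min-scan over the candidates with a binary search (bisect)
-- for the nearest value in the sorted deduplicated candidates (objective: alternative algorithm).

-- ===== PORT A =====
def select_pred_columns_py (available_steps : List Int) (interval : Int) (offset : Int) (max_steps : Int) : List Int :=
  if interval ≤ 0 then
    -- return all steps in range
    available_steps.filter (fun s => decide (offset ≤ s) && decide (s ≤ max_steps))
  else if available_steps.filter (fun s => decide (offset ≤ s) && decide (s ≤ max_steps)) = [] then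
    []
  else
    -- for t in targets: best = min(avail, key=lambda s: (abs(s-t), s)); dedup via `used`
    PySem.List.sorted
      ((PySem.List.pyRange offset (max_steps + 1) interval).foldl
        (fun (acc : List Int × PySem.Set Int) t =>
          match PySem.List.min2?
              (available_steps.filter (fun s => decide (offset ≤ s) && decide (s ≤ max_steps)))
              (fun s => |s - t|) (fun s => s) with
          | some best =>
            if PySem.Set.contains acc.2 best then acc
            else (acc.1 ++ [best], PySem.Set.add acc.2 best)
          | none => acc)
        ([], PySem.Set.empty)).1
      (fun x => x) false

-- ===== PORT B =====
-- helper _nearest of Source B; all list indices taken inside the guards are in range, the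
-- `.getD _ 0` default is never used
def pyBisectNearest (avail : List Int) (t : Int) : Int :=
  if PySem.List.bisectLeft avail t = 0 then avail.getD 0 0
  else if PySem.List.bisectLeft avail t = avail.length then avail.getD (avail.length - 1) 0
  else if t - avail.getD (PySem.List.bisectLeft avail t - 1) 0
          ≤ avail.getD (PySem.List.bisectLeft avail t) 0 - t then
    avail.getD (PySem.List.bisectLeft avail t - 1) 0
  else
    avail.getD (PySem.List.bisectLeft avail t) 0

def select_pred_columns_py_alt (available_steps : List Int) (interval : Int) (offset : Int) (max_steps : Int) : List Int :=
  if interval ≤ 0 then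
    available_steps.filter (fun s => decide (offset ≤ s) && decide (s ≤ max_steps))
  else if PySem.List.sorted
      (PySem.Set.ofList (available_steps.filter (fun s => decide (offset ≤ s) && decide (s ≤ max_steps))))
      (fun x => x) false = [] then
    []
  else
    PySem.List.sorted
      ((PySem.List.pyRange offset (max_steps + 1) interval).foldl
        (fun (ch : PySem.Set Int) t =>
          PySem.Set.add ch
            (pyBisectNearest
              (PySem.List.sorted
                (PySem.Set.ofList (available_steps.filter (fun s => decide (offset ≤ s) && decide (s ≤ max_steps))))
                (fun x => x) false)
              t))
        PySem.Set.empty)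
      (fun x => x) false

-- ===== PRECONDITION & SPEC =====
def Spec_select_pred_columns_py (available_steps : List Int) (interval : Int) (offset : Int) (max_steps : Int) (out : List Int) : Prop := out = select_pred_columns_py_alt available_steps interval offset max_steps
instance (available_steps : List Int) (interval : Int) (offset : Int) (max_steps : Int) (out : List Int) : Decidable (Spec_select_pred_columns_py available_steps interval offset max_steps out) := by unfold Spec_select_pred_columns_py; infer_instance

-- ===== CLAIM (what is proved, stated in full; the proofs are below) =====
def Claim_equal_select_pred_columns_py : Prop := ∀ (available_steps : List Int) (interval : Int) (offset : Int) (max_steps : Int), Dom_select_pred_columns_py available_steps interval offset max_steps → Spec_select_pred_columns_py available_steps interval offset max_steps (select_pred_columns_py available_steps interval offset max_steps)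

-- ===== LEMMAS AND PROOFS =====

-- lexicographic "at most" for the key (|s - t|, s) used by A's min(..., key=...)
def pvLexLe (t a b : Int) : Prop := |a - t| < |b - t| ∨ (¬ |b - t| < |a - t| ∧ a ≤ b)

theorem pvLexLe_refl (t a : Int) : pvLexLe t a a := Or.inr ⟨lt_irrefl _, le_refl _⟩

theorem pvLex_le_trans {ka kb kc a b c : Int}
    (h1 : ka < kb ∨ (¬ kb < ka ∧ a ≤ b)) (h2 : kb < kc ∨ (¬ kc < kb ∧ b ≤ c)) :
    ka < kc ∨ (¬ kc < ka ∧ a ≤ c) := by omega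

theorem pvLexLe_trans {t a b c : Int} (h1 : pvLexLe t a b) (h2 : pvLexLe t b c) :
    pvLexLe t a c := pvLex_le_trans h1 h2

theorem pvLexLe_antisymm {t a b : Int} (h1 : pvLexLe t a b) (h2 : pvLexLe t b a) : a = b := by
  unfold pvLexLe at h1 h2; omega

-- the step of PySem.List.min2? specialised to A's key
def pvMinStep (t : Int) : Option Int → Int → Option Int := fun acc x =>
  match acc with
  | none => some x
  | some m =>
    if (decide (|x - t| < |m - t|) || !decide (|m - t| < |x - t|) && decide (x < m)) = true
    then some x else some m

theorem pvMin2_eq_foldl (t : Int) (F : List Int) :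
    PySem.List.min2? F (fun s => |s - t|) (fun s => s) = F.foldl (pvMinStep t) none := by
  unfold PySem.List.min2?
  congr 1
  funext acc x
  unfold pvMinStep
  cases acc <;> rfl

theorem pvMinStep_fold_spec (t : Int) : ∀ (F : List Int) (m : Int), ∃ b,
    F.foldl (pvMinStep t) (some m) = some b ∧ b ∈ m :: F ∧ ∀ y ∈ m :: F, pvLexLe t b y := by
  intro F
  induction F with
  | nil =>
    intro m
    refine ⟨m, rfl, List.mem_cons_self, ?_⟩
    intro y hy
    rcases List.mem_cons.mp hy with rfl | h
    · exact pvLexLe_refl t y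
    · exact absurd h List.not_mem_nil
  | cons x F ih =>
    intro m
    rw [List.foldl_cons]
    have hstep : pvMinStep t (some m) x =
        some (if (decide (|x - t| < |m - t|) || !decide (|m - t| < |x - t|) && decide (x < m)) = true then x else m) := by
      unfold pvMinStep
      by_cases h : (decide (|x - t| < |m - t|) || !decide (|m - t| < |x - t|) && decide (x < m)) = true <;>
        simp [h]
    by_cases hc : (decide (|x - t| < |m - t|) || !decide (|m - t| < |x - t|) && decide (x < m)) = true
    · -- x wins this round
      rw [hstep, if_pos hc]
      obtain ⟨b, hb, hbmem, hbmin⟩ := ih x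
      have hxm : pvLexLe t x m := by
        simp only [Bool.or_eq_true, Bool.and_eq_true, Bool.not_eq_eq_eq_not, Bool.not_true,
          decide_eq_true_eq, decide_eq_false_iff_not] at hc
        unfold pvLexLe; omega
      refine ⟨b, hb, List.mem_cons_of_mem _ hbmem, ?_⟩
      intro y hy
      rcases List.mem_cons.mp hy with rfl | hy
      · exact pvLexLe_trans (hbmin x List.mem_cons_self) hxm
      · exact hbmin y hy
    · -- m survives
      rw [hstep, if_neg hc]
      obtain ⟨b, hb, hbmem, hbmin⟩ := ih m
      have hmx : pvLexLe t m x := by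
        simp only [Bool.or_eq_true, Bool.and_eq_true, Bool.not_eq_eq_eq_not, Bool.not_true,
          decide_eq_true_eq, decide_eq_false_iff_not] at hc
        unfold pvLexLe; omega
      have hbmem' : b ∈ m :: x :: F := by
        rcases List.mem_cons.mp hbmem with rfl | h
        · exact List.mem_cons_self
        · exact List.mem_cons_of_mem _ (List.mem_cons_of_mem _ h)
      refine ⟨b, hb, hbmem', ?_⟩
      intro y hy
      rcases List.mem_cons.mp hy with rfl | hy
      · exact hbmin y List.mem_cons_self
      · rcases List.mem_cons.mp hy with rfl | hy
        · exact pvLexLe_trans (hbmin m List.mem_cons_self) hmx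
        · exact hbmin y (List.mem_cons_of_mem _ hy)

theorem pvMin2_spec (t : Int) (F : List Int) (hF : F ≠ []) : ∃ b,
    PySem.List.min2? F (fun s => |s - t|) (fun s => s) = some b ∧ b ∈ F ∧ ∀ y ∈ F, pvLexLe t b y := by
  rw [pvMin2_eq_foldl]
  cases F with
  | nil => exact absurd rfl hF
  | cons m F =>
    rw [List.foldl_cons]
    have h0 : pvMinStep t none m = some m := rfl
    rw [h0]
    exact pvMinStep_fold_spec t F m

-- B's _nearest returns the (unique) lexicographic minimiser on a strictly sorted nonempty list
theorem pvBisectNearest_spec (L : List Int) (hne : L ≠ []) (hs : L.Pairwise (· < ·)) (t : Int) :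
    pyBisectNearest L t ∈ L ∧ ∀ y ∈ L, pvLexLe t (pyBisectNearest L t) y := by
  obtain ⟨hlen, hlt, hge⟩ := PySem.List.bisectLeft_spec L t (hs.imp fun h => le_of_lt h)
  have hmono : ∀ (p q : Nat) (_ : p < L.length) (_ : q < L.length), p < q → L[p] < L[q] :=
    List.pairwise_iff_getElem.mp hs
  have hn : 0 < L.length := List.length_pos_iff.mpr hne
  unfold pyBisectNearest
  by_cases h0 : PySem.List.bisectLeft L t = 0
  · rw [if_pos h0]
    rw [List.getD_eq_getElem L 0 hn]
    refine ⟨List.getElem_mem hn, ?_⟩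
    intro y hy
    obtain ⟨j, hj, rfl⟩ := List.mem_iff_getElem.mp hy
    have ht0 : t ≤ L[0] := hge 0 hn (by omega)
    have htj : t ≤ L[j] := hge j hj (by omega)
    have h0j : L[0] ≤ L[j] := by
      rcases Nat.eq_zero_or_pos j with h | h
      · subst h; exact le_refl _
      · exact le_of_lt (hmono 0 j hn hj h)
    unfold pvLexLe
    rw [abs_of_nonneg (by omega : (0:Int) ≤ L[0] - t), abs_of_nonneg (by omega : (0:Int) ≤ L[j] - t)]
    omega
  · rw [if_neg h0]
    by_cases hL : PySem.List.bisectLeft L t = L.length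
    · rw [if_pos hL]
      have hlast : L.length - 1 < L.length := by omega
      rw [List.getD_eq_getElem L 0 hlast]
      refine ⟨List.getElem_mem hlast, ?_⟩
      intro y hy
      obtain ⟨j, hj, rfl⟩ := List.mem_iff_getElem.mp hy
      have htl : L[L.length - 1] < t := hlt _ hlast (by omega)
      have htj : L[j] < t := hlt j hj (by omega)
      have hjl : L[j] ≤ L[L.length - 1] := by
        rcases Nat.lt_or_ge j (L.length - 1) with h | h
        · exact le_of_lt (hmono j (L.length - 1) hj hlast h)
        · have h' : j = L.length - 1 := by omega
          subst h'; exact le_refl _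
      unfold pvLexLe
      rw [abs_of_nonpos (by omega : L[L.length - 1] - t ≤ 0),
          abs_of_nonpos (by omega : L[j] - t ≤ 0)]
      omega
    · rw [if_neg hL]
      have hi1 : PySem.List.bisectLeft L t - 1 < L.length := by omega
      have hi2 : PySem.List.bisectLeft L t < L.length := by omega
      rw [List.getD_eq_getElem L 0 hi1, List.getD_eq_getElem L 0 hi2]
      have hlo : L[PySem.List.bisectLeft L t - 1] < t := hlt _ hi1 (by omega)
      have hhi : t ≤ L[PySem.List.bisectLeft L t] := hge _ hi2 (by omega)
      have hmem1 := List.getElem_mem hi1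
      have hmem2 := List.getElem_mem hi2
      have hkey : ∀ y ∈ L,
          pvLexLe t (if t - L[PySem.List.bisectLeft L t - 1] ≤ L[PySem.List.bisectLeft L t] - t
            then L[PySem.List.bisectLeft L t - 1] else L[PySem.List.bisectLeft L t]) y := by
        intro y hy
        obtain ⟨j, hj, rfl⟩ := List.mem_iff_getElem.mp hy
        have habslo : |L[PySem.List.bisectLeft L t - 1] - t| = -(L[PySem.List.bisectLeft L t - 1] - t) :=
          abs_of_nonpos (by omega)
        have habshi : |L[PySem.List.bisectLeft L t] - t| = L[PySem.List.bisectLeft L t] - t :=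
          abs_of_nonneg (by omega)
        by_cases hside : j < PySem.List.bisectLeft L t
        · -- y is at or below lo
          have hjlo : L[j] ≤ L[PySem.List.bisectLeft L t - 1] := by
            rcases Nat.lt_or_ge j (PySem.List.bisectLeft L t - 1) with h | h
            · exact le_of_lt (hmono j _ hj hi1 h)
            · have h' : j = PySem.List.bisectLeft L t - 1 := by omega
              subst h'; exact le_refl _
          have htj : L[j] < t := hlt j hj hside
          have habsj : |L[j] - t| = -(L[j] - t) := abs_of_nonpos (by omega)
          split_ifs with hc <;> unfold pvLexLe <;>
            rw [habsj] <;> [rw [habslo]; rw [habshi]] <;> omega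
        · -- y is at or above hi
          have hjhi : L[PySem.List.bisectLeft L t] ≤ L[j] := by
            rcases Nat.lt_or_ge (PySem.List.bisectLeft L t) j with h | h
            · exact le_of_lt (hmono _ j hi2 hj h)
            · have h' : j = PySem.List.bisectLeft L t := by omega
              subst h'; exact le_refl _
          have htj : t ≤ L[j] := hge j hj (by omega)
          have habsj : |L[j] - t| = L[j] - t := abs_of_nonneg (by omega)
          split_ifs with hc <;> unfold pvLexLe <;>
            rw [habsj] <;> [rw [habslo]; rw [habshi]] <;> omega
      constructor
      · split_ifs with hc
        · exact hmem1
        · exact hmem2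
      · intro y hy
        have := hkey y hy
        split_ifs at this ⊢ with hc
        · exact this
        · exact this

-- the sorted deduplication of F is strictly sorted and has the same members as F
theorem pvSortedSet_pairwise_lt (F : List Int) :
    (PySem.List.sorted (PySem.Set.ofList F) (fun x => x) false).Pairwise (· < ·) := by
  have hle : (PySem.List.sorted (PySem.Set.ofList F) (fun x => x) false).Pairwise (· ≤ ·) :=
    PySem.List.sorted_pairwise (PySem.Set.ofList F) (fun x => x)
  have hnd : (PySem.List.sorted (PySem.Set.ofList F) (fun x => x) false).Nodup :=
    ((PySem.List.sorted_perm (PySem.Set.ofList F) (fun x => x) false).nodup_iff).mpr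
      (PySem.Set.nodup_ofList F)
  exact (hle.and hnd).imp fun h => lt_of_le_of_ne h.1 h.2

theorem pvSortedSet_mem (F : List Int) (y : Int) :
    y ∈ PySem.List.sorted (PySem.Set.ofList F) (fun x => x) false ↔ y ∈ F := by
  rw [(PySem.List.sorted_perm (PySem.Set.ofList F) (fun x => x) false).mem_iff,
      PySem.Set.mem_ofList]

theorem pvOfList_eq_nil {F : List Int} (h : PySem.Set.ofList F = []) : F = [] := by
  cases F with
  | nil => rfl
  | cons x F =>
    exfalso
    have hx : x ∈ PySem.Set.ofList (x :: F) := (PySem.Set.mem_ofList _ _).mpr List.mem_cons_self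
    rw [h] at hx
    exact List.not_mem_nil hx

-- KEY LEMMA: A's linear min equals B's bisect-nearest on the sorted dedup of F
theorem pvNear_eq (F : List Int) (hF : F ≠ []) (t : Int) :
    PySem.List.min2? F (fun s => |s - t|) (fun s => s) =
      some (pyBisectNearest (PySem.List.sorted (PySem.Set.ofList F) (fun x => x) false) t) := by
  have hLne : PySem.List.sorted (PySem.Set.ofList F) (fun x => x) false ≠ [] := fun h =>
    hF (pvOfList_eq_nil ((PySem.List.sorted_eq_nil_iff _ _ _).mp h))
  obtain ⟨b, hb, hbmem, hbmin⟩ := pvMin2_spec t F hF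
  obtain ⟨hm, hmin⟩ := pvBisectNearest_spec _ hLne (pvSortedSet_pairwise_lt F) t
  rw [hb]
  congr 1
  exact pvLexLe_antisymm (hbmin _ ((pvSortedSet_mem F _).mp hm))
    (hmin _ ((pvSortedSet_mem F _).mpr hbmem))

-- A's loop (list + `used` set) computes the same set as folding Set.add over the nearest values
theorem pvAfold (f : Int → Int) : ∀ (ts : List Int) (c : List Int),
    ts.foldl (fun (acc : List Int × PySem.Set Int) t =>
        if PySem.Set.contains acc.2 (f t) then acc
        else (acc.1 ++ [f t], PySem.Set.add acc.2 (f t))) (c, c) =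
      ((ts.map f).foldl PySem.Set.add c, (ts.map f).foldl PySem.Set.add c) := by
  intro ts
  induction ts with
  | nil => intro c; rfl
  | cons t ts ih =>
    intro c
    rw [List.foldl_cons, List.map_cons, List.foldl_cons]
    have hstep : (if PySem.Set.contains c (f t) then ((c, c) : List Int × PySem.Set Int)
        else (c ++ [f t], PySem.Set.add c (f t))) = (PySem.Set.add c (f t), PySem.Set.add c (f t)) := by
      by_cases h : f t ∈ c <;>
        simp [PySem.Set.add, PySem.Set.contains, h]
    rw [hstep]
    exact ih _

-- ===== VERDICT (by name: the statement is the Claim_ definition above) =====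
theorem select_pred_columns_py_spec : Claim_equal_select_pred_columns_py := by
  intro available_steps interval offset max_steps _hdom
  unfold Spec_select_pred_columns_py select_pred_columns_py select_pred_columns_py_alt
  by_cases hiv : interval ≤ 0
  · rw [if_pos hiv, if_pos hiv]
  · rw [if_neg hiv, if_neg hiv]
    set F := available_steps.filter (fun s => decide (offset ≤ s) && decide (s ≤ max_steps)) with hFdef
    by_cases hFe : F = []
    · rw [if_pos hFe, if_pos (by rw [PySem.List.sorted_eq_nil_iff, hFe]; rfl)]
    · have hLne : PySem.List.sorted (PySem.Set.ofList F) (fun x => x) false ≠ [] := fun h =>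
        hFe (pvOfList_eq_nil ((PySem.List.sorted_eq_nil_iff _ _ _).mp h))
      rw [if_neg hFe, if_neg hLne]
      have hstep : (fun (acc : List Int × PySem.Set Int) t =>
          match PySem.List.min2? F (fun s => |s - t|) (fun s => s) with
          | some best =>
            if PySem.Set.contains acc.2 best then acc
            else (acc.1 ++ [best], PySem.Set.add acc.2 best)
          | none => acc) =
          (fun (acc : List Int × PySem.Set Int) t =>
            if PySem.Set.contains acc.2
                (pyBisectNearest (PySem.List.sorted (PySem.Set.ofList F) (fun x => x) false) t) then acc
            else (acc.1 ++ [pyBisectNearest (PySem.List.sorted (PySem.Set.ofList F) (fun x => x) false) t],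
              PySem.Set.add acc.2
                (pyBisectNearest (PySem.List.sorted (PySem.Set.ofList F) (fun x => x) false) t))) := by
        funext acc t
        rw [pvNear_eq F hFe t]
      rw [hstep]
      have hempty : (([], PySem.Set.empty) : List Int × PySem.Set Int) = (([], []) : List Int × PySem.Set Int) := rfl
      rw [hempty,
        pvAfold (fun t => pyBisectNearest (PySem.List.sorted (PySem.Set.ofList F) (fun x => x) false) t)
          (PySem.List.pyRange offset (max_steps + 1) interval) ([] : List Int),
        List.foldl_map]
      rfl
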